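-- pv_equiv track=rewrite | github.com/selimseker/CS-IntroToProgramming_I | number board game/assignment4.py | refresh_schema
-- ===== SOURCE A (Python) =====
-- def refresh_schema(game_schema):
--     for i in game_schema:
--         for j in i:
--             if j == " ":
--                 empty = True
--             else:
--                 empty = False
--                 break
--         if empty is False:
--             break
--
--     # If all cells are empty then no need for refresh because game is already over
--     if empty is True:
--         return game_schema, True
--
--     else:
--
--         # If there is just one row then no need for refresh
--         if len(game_schema) == 3:
--             return game_schema, False
--
--         for i in range(1, len(game_schema) - 2):
--             for j in range(1, len(game_schema[i]) - 1):
--                 if game_schema[i][j] != " " and game_schema[i+1][j] == " ":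
--                     done_schema = False
--                     break
--                 else:
--                     done_schema = True
--             if done_schema is False:
--                 break
--
--         if done_schema is True:
--             return game_schema, False
--         else:
--             for m in range(1, len(game_schema) - 1):
--                 for n in range(1, len(game_schema[m]) - 1):
--                     if game_schema[m][n] == " " and game_schema[m-1][n] != " ":
--                         game_schema[m][n] = game_schema[m-1][n]
--                         game_schema[m-1][n] = " "
--             return refresh_schema(game_schema)
-- ===== SOURCE B (Python) =====
-- def _fall(col):
--     # one gravity tick on a column: each piece with a blank directly below
--     # cascades down through the blank run (last cell is the floor, untouched)
--     out = []
--     carry = col[0]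
--     for b in col[1:-1]:
--         if b == " " and carry != " ":
--             out.append(" ")
--         else:
--             out.append(carry)
--             carry = b
--     out.append(carry)
--     out.append(col[-1])
--     return out
--
--
-- def _stable(col):
--     inner = col[1:-1]
--     return all(not (a != " " and b == " ") for a, b in zip(inner, inner[1:]))
--
--
-- def refresh_schema(game_schema):
--     if all(c == " " for row in game_schema for c in row):
--         return game_schema, True
--     if len(game_schema) == 3:
--         return game_schema, False
--     cols = [list(col) for col in zip(*game_schema, strict=True)]
--     while not all(_stable(c) for c in cols[1:-1]):
--         cols[1:-1] = [_fall(c) for c in cols[1:-1]]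
--     return [list(row) for row in zip(*cols)], False
-- ===== Notes on version B (the rewrite author's own statement) =====
-- stated objective: alternative
-- what changed: A walks the board row-major with flag-and-break scans, swaps cells in place and recurses until stable; B transposes the board to columns, repeatedly applies a carry-based one-pass gravity tick to every interior column until all are stable, and transposes back; Pre_ excludes boards on which A raises (empty board, empty rows, narrow non-blank boards) and ragged boards with >= 4 rows, on which A's in-range probing is accidental and B works on the zip-truncated rectangle.
import Mathlib
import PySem

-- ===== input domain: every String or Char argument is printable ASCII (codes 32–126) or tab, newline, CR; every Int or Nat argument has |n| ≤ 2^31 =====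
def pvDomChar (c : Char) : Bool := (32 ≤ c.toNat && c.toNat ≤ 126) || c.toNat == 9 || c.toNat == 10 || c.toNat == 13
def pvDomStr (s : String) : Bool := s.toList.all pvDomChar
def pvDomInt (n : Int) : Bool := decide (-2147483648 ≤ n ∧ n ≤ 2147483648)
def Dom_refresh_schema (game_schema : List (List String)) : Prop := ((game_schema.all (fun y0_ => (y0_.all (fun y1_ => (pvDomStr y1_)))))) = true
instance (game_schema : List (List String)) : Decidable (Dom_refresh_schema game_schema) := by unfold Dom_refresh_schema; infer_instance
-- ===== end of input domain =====

-- B transposes to columns and repeatedly applies a carry-based one-pass gravity tick to every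
-- interior column until all are stable, instead of A's row-major cell-swap passes with
-- flag-and-break scans and recursion; the equivalence is about the RETURN value only
-- (A mutates its argument in place, B builds a new board).

-- ===== PORT A =====
def gRow (g : List (List String)) (m : Nat) : List String := g.getD m []

-- g[m][n] (in bounds on every admitted input, so getD is exact there)
def cell (g : List (List String)) (m n : Nat) : String := (gRow g m).getD n " "

def setCell (g : List (List String)) (m n : Nat) (v : String) : List (List String) :=
  g.set m ((gRow g m).set n v)

-- first double loop of A: `empty` scan with break (carried flag)
def scanRowA : List String → Bool → Bool
  | [], e => e
  | c :: rest, _ => if c == " " then scanRowA rest true else false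

def scanA : List (List String) → Bool → Bool
  | [], e => e
  | r :: rest, e => let e' := scanRowA r e; if e' then scanA rest e' else false

-- `done_schema` double loop with break (carried flag)
def checkRowA (g : List (List String)) (i : Nat) : List Nat → Bool → Bool
  | [], d => d
  | j :: js, _ =>
    if cell g i j != " " && cell g (i + 1) j == " " then false else checkRowA g i js true

def checkA (g : List (List String)) : List Nat → Bool → Bool
  | [], d => d
  | i :: is, d =>
    let d' := checkRowA g i (List.range' 1 ((gRow g i).length - 2)) d
    if d' then checkA g is d' else false

def doneA (g : List (List String)) : Bool := checkA g (List.range' 1 (g.length - 3)) true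

-- body of the moving double loop
def moveC (m : Nat) (g : List (List String)) (n : Nat) : List (List String) :=
  if cell g m n == " " && cell g (m - 1) n != " " then
    setCell (setCell g m n (cell g (m - 1) n)) (m - 1) n " "
  else g

def passA (g : List (List String)) : List (List String) :=
  (List.range' 1 (g.length - 2)).foldl
    (fun g' m => (List.range' 1 ((gRow g' m).length - 2)).foldl (moveC m) g') g

-- A's tail recursion, made total with fuel (generous bound, proved sufficient on Pre_)
def loopA : Nat → List (List String) → List (List String) × Bool
  | 0, g => (g, false)
  | fuel + 1, g =>
    if scanA g true then (g, true)
    else if g.length == 3 then (g, false)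
    else if doneA g then (g, false)
    else loopA fuel (passA g)

def refresh_schema (game_schema : List (List String)) : List (List String) × Bool :=
  loopA (game_schema.length * game_schema.length * (gRow game_schema 0).length + 2) game_schema

-- ===== PORT B =====
-- one gravity tick on a column (carry walk over col[1:-1]; Source B's _fall)
def spB : String → List String → List String
  | a, [] => [a]
  | a, b :: t => if b == " " && a != " " then " " :: spB a t else a :: spB b t

def fallB (col : List String) : List String :=
  spB (col.headD " ") ((col.drop 1).dropLast) ++ [col.getLastD " "]

-- Source B's _stable
def stableB (col : List String) : Bool :=
  let inner := (col.drop 1).dropLast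
  (inner.zip (inner.drop 1)).all (fun p => !(p.1 != " " && p.2 == " "))

-- column j of the board (zip(*game_schema); exact on the rectangular boards Pre_ admits)
def colOf (g : List (List String)) (j : Nat) : List String :=
  g.map (fun row => row.getD j " ")

-- Source B's while loop: tick every interior column until all are stable
-- (fuel-guarded; the fuel is proved sufficient on Pre_)
def loopB : Nat → List (List String) → List (List String)
  | 0, mid => mid
  | f + 1, mid => if mid.all stableB then mid else loopB f (mid.map fallB)

def refresh_schema_alt (game_schema : List (List String)) : List (List String) × Bool :=
  if game_schema.all (fun row => row.all (fun c => c == " ")) then (game_schema, true)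
  else if game_schema.length == 3 then (game_schema, false)
  else
    let cols := (List.range ((game_schema.headD []).length)).map (colOf game_schema)
    let mid := loopB (game_schema.length * game_schema.length + 1) ((cols.drop 1).dropLast)
    let cols' := cols.headD [] :: mid ++ [cols.getLastD []]
    ((List.range game_schema.length).map (fun m => cols'.map (fun col => col.getD m " ")), false)

-- ===== PRECONDITION & SPEC =====
-- Pre_ excludes boards on which A raises (NameError/IndexError: empty board, empty first
-- row, too-narrow or 1–2-row non-blank boards) and ragged (non-rectangular) non-blank boards
-- with ≥ 4 rows, on some of which A returns only because its probing happens to stay in range.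
def Pre_refresh_schema (game_schema : List (List String)) : Prop :=
  game_schema ≠ [] ∧ game_schema.headD [] ≠ [] ∧
    ((∀ row ∈ game_schema, ∀ c ∈ row, c = " ") ∨ game_schema.length = 3 ∨
      (4 ≤ game_schema.length ∧
        (∀ row ∈ game_schema, row.length = (game_schema.headD []).length) ∧
        3 ≤ (game_schema.headD []).length))

instance (game_schema : List (List String)) : Decidable (Pre_refresh_schema game_schema) := by
  unfold Pre_refresh_schema; infer_instance

def pvWitness_refresh_schema : List (List String) :=
  [["*", "*", "*"], ["*", "x", "*"], ["*", " ", "*"], ["*", "*", "*"]]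

def Spec_refresh_schema (game_schema : List (List String)) (out : List (List String) × Bool) : Prop :=
  out = refresh_schema_alt game_schema

instance (game_schema : List (List String)) (out : List (List String) × Bool) :
    Decidable (Spec_refresh_schema game_schema out) := by unfold Spec_refresh_schema; infer_instance

-- ===== CLAIM (what is proved, stated in full; the proofs are below) =====
def Claim_equal_refresh_schema : Prop :=
  ∀ (game_schema : List (List String)), Dom_refresh_schema game_schema →
    Pre_refresh_schema game_schema →
    Spec_refresh_schema game_schema (refresh_schema game_schema)

-- ===== LEMMAS AND PROOFS =====

-- ---- generic column vocabulary used by the proofs ----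

-- is the board all blank (value form)
def allBlank (g : List (List String)) : Bool :=
  g.all (fun row => row.all (fun c => c == " "))

-- one gravity step at board row index i (reads/writes positions i-1, i of a column)
def stepC (i : Nat) (c : List String) : List String :=
  if c.getD i " " = " " ∧ c.getD (i - 1) " " ≠ " " then
    (c.set (i - 1) " ").set i (c.getD (i - 1) " ")
  else c

-- carry walk limited to k steps
def wk : Nat → String → List String → List String
  | 0, a, l => a :: l
  | _ + 1, a, [] => [a]
  | k + 1, a, b :: t => if b == " " && a != " " then " " :: wk k a t else a :: wk k b t

-- potential of (the active part of) a column
def phi : List String → Nat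
  | [] => 0
  | x :: t => (if x = " " then 0 else t.count " ") + phi t

def phiA (col : List String) : Nat := phi col.dropLast

def PhiG (g : List (List String)) (C : Nat) : Nat :=
  ((List.range' 1 (C - 2)).map (fun j => phiA (colOf g j))).sum

-- ---- basic facts ----

theorem phi_le_sq (l : List String) : phi l ≤ l.length * l.length := by
  induction l with
  | nil => simp [phi]
  | cons x t ih =>
    have h1 : t.count " " ≤ t.length := List.count_le_length
    simp only [phi, List.length_cons]
    have : (if x = " " then 0 else t.count " ") ≤ t.length := by split <;> omega
    nlinarith [ih]

theorem spB_perm (a : String) (l : List String) : (spB a l).Perm (a :: l) := by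
  induction l generalizing a with
  | nil => simp [spB]
  | cons b t ih =>
    simp only [spB]
    split
    · rename_i h
      simp only [Bool.and_eq_true, beq_iff_eq, bne_iff_ne] at h
      refine (List.Perm.cons " " (ih a)).trans ?_
      rw [← h.1]
      exact List.Perm.swap _ _ _
    · exact List.Perm.cons _ (ih b)

theorem count_spB (a : String) (l : List String) (v : String) :
    (spB a l).count v = (a :: l).count v := (spB_perm a l).count_eq v

theorem phi_spB_le (a : String) (l : List String) : phi (spB a l) ≤ phi (a :: l) := by
  induction l generalizing a with
  | nil => simp [spB]
  | cons b t ih =>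
    simp only [spB]
    split
    · rename_i h
      simp only [Bool.and_eq_true, beq_iff_eq, bne_iff_ne] at h
      have hle := ih a
      simp [phi, h.1, h.2, List.count_cons] at hle ⊢
      omega
    · rename_i h
      have hc : (spB b t).count " " = (b :: t).count " " := count_spB b t " "
      have hle := ih b
      simp only [phi, hc] at hle ⊢
      omega

-- any adjacent (piece, blank) pair in l (or carried piece over blank head) forces a strict drop
theorem phi_spB_lt (a : String) (l : List String)
    (h : (a ≠ " " ∧ l.head? = some " ") ∨ ((l.zip (l.drop 1)).any (fun p => p.1 != " " && p.2 == " ")) = true) :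
    phi (spB a l) < phi (a :: l) := by
  induction l generalizing a with
  | nil => simp at h
  | cons b t ih =>
    simp only [spB]
    split
    · rename_i hsw
      simp only [Bool.and_eq_true, beq_iff_eq, bne_iff_ne] at hsw
      have hle := phi_spB_le a t
      simp [phi, hsw.1, hsw.2, List.count_cons] at hle ⊢
      omega
    · rename_i hsw
      -- no swap at head
      have hc : (spB b t).count " " = (b :: t).count " " := count_spB b t " "
      have hlt : phi (spB b t) < phi (b :: t) := by
        apply ih
        rcases h with ⟨ha, hh⟩ | hz
        · -- head is " " and a ≠ " " would be a swap; contradiction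
          simp only [List.head?_cons, Option.some_inj] at hh
          exact absurd (by simp [hh, ha]) hsw
        · -- violation inside b :: t
          cases t with
          | nil => simp at hz
          | cons c t' =>
            simp only [List.drop_succ_cons, List.drop_zero, List.zip_cons_cons, List.any_cons,
              Bool.or_eq_true] at hz
            rcases hz with hbc | hrest
            · left
              simp only [Bool.and_eq_true, bne_iff_ne, beq_iff_eq] at hbc
              exact ⟨hbc.1, by simp [hbc.2]⟩
            · right
              simpa using hrest
      simp only [phi, hc] at hlt ⊢
      omega

-- has an adjacent (piece, blank) pair
def hv (l : List String) : Bool := (l.zip (l.drop 1)).any (fun p => p.1 != " " && p.2 == " ")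

-- the part of a column that A's stability check looks at
def midc (col : List String) : List String := (col.drop 1).dropLast

theorem all_not {α : Type} (l : List α) (p : α → Bool) :
    l.all (fun x => !p x) = !(l.any p) := by
  induction l with
  | nil => simp
  | cons a t ih => simp [ih, Bool.not_or]

theorem stableB_eq_not_hv (col : List String) : stableB col = !hv (midc col) := by
  simp only [stableB, hv, midc]
  exact all_not _ _

theorem fallB_eq (col : List String) :
    fallB col = spB (col.headD " ") (midc col) ++ [col.getLastD " "] := rfl

theorem phiA_cons_form (col : List String) :
    phiA col = phi (col.headD " " :: midc col) := by
  match col with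
  | [] => simp [phiA, phi, midc]
  | [c] => simp [phiA, phi, midc]
  | c :: r :: t => simp [phiA, phi, midc, List.dropLast_cons₂]

theorem phiA_fallB (col : List String) :
    phiA (fallB col) = phi (spB (col.headD " ") (midc col)) := by
  rw [fallB_eq, phiA]
  rw [List.dropLast_concat]

theorem stableB_false_phiA (col : List String) (h : stableB col = false) :
    phiA (fallB col) < phiA col := by
  rw [phiA_fallB, phiA_cons_form]
  apply phi_spB_lt
  right
  rw [stableB_eq_not_hv] at h
  simpa [hv] using h

theorem phiA_fallB_le (col : List String) : phiA (fallB col) ≤ phiA col := by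
  rw [phiA_fallB, phiA_cons_form]
  exact phi_spB_le _ _

theorem hv_cons (b : String) (t : List String) :
    hv (b :: t) = ((t.head?.elim false (fun c => b != " " && c == " ")) || hv t) := by
  cases t <;> simp [hv]

theorem hv_false_struct (l : List String) (h : hv l = false) :
    ∃ k ps, l = List.replicate k " " ++ ps ∧ ∀ x ∈ ps, x ≠ " " := by
  induction l with
  | nil => exact ⟨0, [], rfl, by simp⟩
  | cons b t ih =>
    rw [hv_cons] at h
    simp only [Bool.or_eq_false_iff] at h
    obtain ⟨k, ps, ht, hps⟩ := ih h.2
    by_cases hb : b = " "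
    · exact ⟨k + 1, ps, by simp [hb, ht, List.replicate_succ], hps⟩
    · have hk : k = 0 := by
        by_contra hk0
        obtain ⟨k', rfl⟩ : ∃ k', k = k' + 1 := ⟨k - 1, by omega⟩
        have : t.head? = some " " := by
          rw [ht]; simp [List.replicate_succ]
        simp [this, hb] at h
      subst hk
      refine ⟨0, b :: ps, by simpa using ht, ?_⟩
      intro x hx
      rcases List.mem_cons.1 hx with rfl | hx
      · exact hb
      · exact hps x hx

theorem hv_pieces (ps : List String) (h : ∀ x ∈ ps, x ≠ " ") : hv ps = false := by
  induction ps with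
  | nil => simp [hv]
  | cons p t ih =>
    rw [hv_cons]
    have ht : hv t = false := ih (fun x hx => h x (List.mem_cons_of_mem _ hx))
    cases t with
    | nil => simp [ht]
    | cons c t' =>
      have hc : c ≠ " " := h c (by simp)
      simp [ht, hc]

theorem getLastD_concat' (l : List String) (a : String) : (l ++ [a]).getLastD " " = a := by
  simp [List.getLastD_eq_getLast?, List.getLast?_concat]

theorem hv_rep_pieces (k : Nat) (ps : List String) (h : ∀ x ∈ ps, x ≠ " ") :
    hv (List.replicate k " " ++ ps) = false := by
  induction k with
  | zero => simpa using hv_pieces ps h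
  | succ k ih =>
    rw [List.replicate_succ, List.cons_append, hv_cons, ih]
    cases hh : (List.replicate k " " ++ ps).head? with
    | none => simp
    | some c => simp

theorem spB_pieces (ps : List String) (h : ∀ x ∈ ps, x ≠ " ") (a : String) :
    spB a ps = a :: ps := by
  induction ps generalizing a with
  | nil => simp [spB]
  | cons p t ih =>
    have hp : p ≠ " " := h p (by simp)
    rw [spB, if_neg (by simp [hp]), ih (fun x hx => h x (List.mem_cons_of_mem _ hx))]

theorem spB_blank (k : Nat) (ps : List String) (h : ∀ x ∈ ps, x ≠ " ") :
    spB " " (List.replicate k " " ++ ps) = " " :: (List.replicate k " " ++ ps) := by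
  induction k with
  | zero => simpa using spB_pieces ps h " "
  | succ k ih =>
    rw [List.replicate_succ, List.cons_append, spB, if_neg (by simp), ih]

theorem spB_rep (k : Nat) (ps : List String) (h : ∀ x ∈ ps, x ≠ " ") (a : String)
    (ha : a ≠ " ") :
    spB a (List.replicate (k + 1) " " ++ ps) = List.replicate (k + 1) " " ++ a :: ps := by
  induction k with
  | zero =>
    simp only [List.replicate_succ, List.replicate_zero, List.cons_append, List.nil_append]
    rw [spB, if_pos (by simp [ha]), spB_pieces ps h a]
  | succ k ih =>
    rw [List.replicate_succ (n := k + 1), List.cons_append, spB, if_pos (by simp [ha]), ih]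
    simp

theorem fallB_struct (col : List String) (h : stableB col = true) :
    fallB (fallB col) = fallB col ∧ stableB (fallB col) = true := by
  have hhv : hv (midc col) = false := by
    rw [stableB_eq_not_hv] at h; simpa using h
  obtain ⟨k, ps, hm, hps⟩ := hv_false_struct _ hhv
  by_cases hc : col.headD " " = " " ∨ k = 0
  · have hsp : spB (col.headD " ") (midc col) = col.headD " " :: midc col := by
      rcases hc with hc | hc
      · rw [hc, hm]; exact spB_blank k ps hps
      · subst hc; rw [hm]; simpa using spB_pieces ps hps _
    have hfc : fallB col = (col.headD " " :: midc col) ++ [col.getLastD " "] := by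
      rw [fallB_eq, hsp]
    have hhead : (fallB col).headD " " = col.headD " " := by rw [hfc]; simp
    have hmid : midc (fallB col) = midc col := by
      rw [hfc, List.cons_append, midc]
      simp only [List.drop_succ_cons, List.drop_zero]
      rw [List.dropLast_concat]
    have hlast : (fallB col).getLastD " " = col.getLastD " " := by
      rw [hfc, getLastD_concat']
    constructor
    · rw [fallB_eq (fallB col), hhead, hmid, hlast, hsp, ← hfc]
    · rw [stableB_eq_not_hv, hmid, hhv]; rfl
  · rw [not_or] at hc
    obtain ⟨hh, hk⟩ := hc
    obtain ⟨k', rfl⟩ : ∃ k', k = k' + 1 := ⟨k - 1, by omega⟩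
    have hsp : spB (col.headD " ") (midc col) =
        List.replicate (k' + 1) " " ++ col.headD " " :: ps := by
      rw [hm]; exact spB_rep k' ps hps _ hh
    have hall : ∀ x ∈ col.headD " " :: ps, x ≠ " " := by
      intro x hx
      rcases List.mem_cons.1 hx with rfl | hx
      · exact hh
      · exact hps x hx
    have hfc : fallB col =
        (List.replicate (k' + 1) " " ++ col.headD " " :: ps) ++ [col.getLastD " "] := by
      rw [fallB_eq, hsp]
    have hfc' : fallB col =
        " " :: ((List.replicate k' " " ++ col.headD " " :: ps) ++ [col.getLastD " "]) := by
      rw [hfc, List.replicate_succ, List.cons_append, List.cons_append]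
    have hhead2 : (fallB col).headD " " = " " := by rw [hfc']; simp
    have hmid : midc (fallB col) = List.replicate k' " " ++ col.headD " " :: ps := by
      rw [hfc', midc]
      simp only [List.drop_succ_cons, List.drop_zero]
      rw [List.dropLast_concat]
    have hlast2 : (fallB col).getLastD " " = col.getLastD " " := by
      rw [hfc', ← List.cons_append, getLastD_concat']
    have hstable : stableB (fallB col) = true := by
      rw [stableB_eq_not_hv, hmid, hv_rep_pieces k' _ hall]; rfl
    refine ⟨?_, hstable⟩
    rw [fallB_eq (fallB col), hhead2, hmid, hlast2, spB_blank k' _ hall, hfc',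
      List.cons_append]

theorem stableB_fallB_of_stable (col : List String) (h : stableB col = true) :
    stableB (fallB col) = true := (fallB_struct col h).2

-- stabilization time of a column
theorem exists_stab (col : List String) : ∃ p, stableB (fallB^[p] col) = true := by
  by_cases h : stableB col = true
  · exact ⟨0, by simpa using h⟩
  · obtain ⟨p, hp⟩ := exists_stab (fallB col)
    exact ⟨p + 1, by rw [Function.iterate_succ_apply]; exact hp⟩
termination_by phiA col
decreasing_by exact stableB_false_phiA col (by simpa using h)

def tau (col : List String) : Nat := Nat.find (exists_stab col)

theorem tau_spec (col : List String) : stableB (fallB^[tau col] col) = true :=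
  Nat.find_spec (exists_stab col)

theorem tau_zero_iff (col : List String) : tau col = 0 ↔ stableB col = true := by
  unfold tau
  rw [Nat.find_eq_zero]
  simp

theorem tau_fallB (col : List String) : tau (fallB col) = tau col - 1 := by
  by_cases h : stableB col = true
  · have h0 : tau col = 0 := (tau_zero_iff col).2 h
    have h1 : tau (fallB col) = 0 := (tau_zero_iff _).2 (stableB_fallB_of_stable col h)
    omega
  · have hne : tau col ≠ 0 := fun h0 => h ((tau_zero_iff col).1 h0)
    have hle : tau col ≤ tau (fallB col) + 1 := by
      apply Nat.find_le
      rw [Function.iterate_succ_apply]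
      exact tau_spec (fallB col)
    have hge : tau (fallB col) ≤ tau col - 1 := by
      apply Nat.find_le
      obtain ⟨s, hs⟩ : ∃ s, tau col = s + 1 := ⟨tau col - 1, by omega⟩
      have h2 := tau_spec col
      rw [hs, Function.iterate_succ_apply] at h2
      simpa [hs] using h2
    omega

theorem tau_le_phiA (col : List String) : tau col ≤ phiA col := by
  by_cases h : stableB col = true
  · simp [(tau_zero_iff col).2 h]
  · have hlt := stableB_false_phiA col (by simpa using h)
    have ih := tau_le_phiA (fallB col)
    have := tau_fallB col
    have hne : tau col ≠ 0 := fun h0 => h ((tau_zero_iff col).1 h0)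
    omega
termination_by phiA col
decreasing_by exact stableB_false_phiA col (by simpa using h)

-- ---- A's scans in value form ----

theorem scanRowA_eq (r : List String) (e : Bool) :
    scanRowA r e = if r.isEmpty then e else r.all (fun c => c == " ") := by
  induction r generalizing e with
  | nil => simp [scanRowA]
  | cons c rest ih =>
    rw [scanRowA]
    by_cases hc : (c == " ") = true
    · rw [if_pos hc, ih]
      cases rest <;> simp_all
    · rw [if_neg hc]
      simp_all

theorem scanA_true (g : List (List String)) : scanA g true = allBlank g := by
  induction g with
  | nil => simp [scanA, allBlank]
  | cons r t ih =>
    rw [scanA]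
    have hre : scanRowA r true = r.all (fun c => c == " ") := by
      rw [scanRowA_eq]
      cases r <;> simp
    simp only [hre]
    by_cases hall : r.all (fun c => c == " ") = true
    · rw [if_pos hall, hall, ih]
      simp [allBlank, hall]
    · rw [if_neg hall]
      simp only [Bool.not_eq_true] at hall
      simp [allBlank, hall]

theorem checkRowA_eq (g : List (List String)) (i : Nat) (js : List Nat) (d : Bool) :
    checkRowA g i js d =
      if js.isEmpty then d else js.all (fun j => !(cell g i j != " " && cell g (i + 1) j == " ")) := by
  induction js generalizing d with
  | nil => simp [checkRowA]
  | cons j js ih =>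
    rw [checkRowA]
    by_cases hv' : (cell g i j != " " && cell g (i + 1) j == " ") = true
    · rw [if_pos hv', if_neg (by simp)]
      simp only [List.all_cons, hv', Bool.not_true, Bool.false_and]
    · rw [if_neg hv', ih]
      have hX : (cell g i j != " " && cell g (i + 1) j == " ") = false := by
        simpa using hv'
      have hP : cell g i j = " " ∨ ¬cell g (i + 1) j = " " := by
        by_cases h1 : cell g i j = " "
        · exact Or.inl h1
        · right
          intro h2
          apply hv'
          simp [h1, h2]
      cases js <;> simp [hX] <;> tauto

-- ---- the moving pass, column by column ----

theorem colOf_length (g : List (List String)) (j : Nat) : (colOf g j).length = g.length := by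
  simp [colOf]

theorem cell_colOf (g : List (List String)) (m j : Nat) (hm : m < g.length) :
    (colOf g j).getD m " " = cell g m j := by
  simp [colOf, cell, gRow, List.getD, List.getElem?_map, List.getElem?_eq_getElem hm]

theorem gRow_set_self (g : List (List String)) (i : Nat) (hi : i < g.length) (r : List String) :
    gRow (g.set i r) i = r := by
  simp [gRow, List.getD, List.getElem?_set_self', List.getElem?_eq_getElem hi]

theorem gRow_set_ne (g : List (List String)) (i k : Nat) (h : i ≠ k) (r : List String) :
    gRow (g.set i r) k = gRow g k := by
  simp [gRow, List.getD, List.getElem?_set_ne h]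

theorem set_gRow_self (g : List (List String)) (i : Nat) : g.set i (gRow g i) = g := by
  by_cases hi : i < g.length
  · apply List.ext_getElem
    · simp
    · intro n hn hn'
      rw [List.getElem_set]
      split
      · rename_i h; subst h
        simp [gRow, List.getD, List.getElem?_eq_getElem hi]
      · rfl
  · rw [List.set_eq_of_length_le (by omega)]

theorem getD_set_self' (l : List String) (n : Nat) (hn : n < l.length) (v : String) :
    (l.set n v).getD n " " = v := by
  simp [List.getD, List.getElem?_set_self', List.getElem?_eq_getElem hn]

theorem getD_set_ne' (l : List String) (n k : Nat) (h : n ≠ k) (v : String) :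
    (l.set n v).getD k " " = l.getD k " " := by
  simp [List.getD, List.getElem?_set_ne h]

-- the inner n-loop at row m rewrites only rows m-1 and m (pair fold)
def pairStep (p : List String × List String) (n : Nat) : List String × List String :=
  if p.2.getD n " " == " " && p.1.getD n " " != " " then
    (p.1.set n " ", p.2.set n (p.1.getD n " "))
  else p

theorem set_swap (g : List (List String)) (i j : Nat) (h : i ≠ j) (a b : List String) :
    (g.set i a).set j b = (g.set j b).set i a := by
  apply List.ext_getElem
  · simp
  · intro n hn hn'
    simp only [List.getElem_set]
    split_ifs <;> simp_all

theorem set_set_collapse (g : List (List String)) (i j : Nat) (h : i ≠ j)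
    (a b a' b' : List String) :
    (((g.set i a).set j b).set i a').set j b' = (g.set i a').set j b' := by
  apply List.ext_getElem
  · simp
  · intro n hn hn'
    simp only [List.getElem_set]
    split_ifs <;> simp_all

theorem inner_as_pair (m : Nat) (hm1 : 1 ≤ m) (js : List Nat) :
    ∀ g : List (List String), m < g.length →
      js.foldl (moveC m) g =
        (g.set (m - 1) (js.foldl pairStep (gRow g (m - 1), gRow g m)).1).set m
          (js.foldl pairStep (gRow g (m - 1), gRow g m)).2 := by
  induction js with
  | nil =>
    intro g _
    simp only [List.foldl_nil]
    rw [set_gRow_self, set_gRow_self]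
  | cons n js ih =>
    intro g hm
    have hmm : m - 1 ≠ m := by omega
    have hm1' : m - 1 < g.length := by omega
    have hstep : moveC m g n =
        (g.set (m - 1) (pairStep (gRow g (m - 1), gRow g m) n).1).set m
          (pairStep (gRow g (m - 1), gRow g m) n).2 := by
      rw [moveC, pairStep]
      simp only [cell]
      split
      · rw [setCell, setCell, gRow_set_ne _ m (m - 1) hmm.symm]
        exact set_swap _ m (m - 1) hmm.symm _ _
      · rw [set_gRow_self, set_gRow_self]
    rw [List.foldl_cons, List.foldl_cons, hstep]
    set P := pairStep (gRow g (m - 1), gRow g m) n with hP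
    set g' := (g.set (m - 1) P.1).set m P.2 with hg'
    have hlen : g'.length = g.length := by simp [hg']
    have hrow1 : gRow g' (m - 1) = P.1 := by
      rw [hg', gRow_set_ne _ m (m - 1) hmm.symm, gRow_set_self _ _ hm1']
    have hrow2 : gRow g' m = P.2 := by
      rw [hg', gRow_set_self _ _ (by simpa [hg'] using hm)]
    rw [ih g' (by omega), hrow1, hrow2, hg']
    exact set_set_collapse g (m - 1) m (by omega) _ _ _ _

theorem pairFold_getD (js : List Nat) (a b : List String) (hnd : js.Nodup)
    (hlen : ∀ n ∈ js, n < a.length ∧ n < b.length) (k : Nat) :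
    (js.foldl pairStep (a, b)).1.getD k " " =
        (if k ∈ js ∧ b.getD k " " = " " ∧ a.getD k " " ≠ " " then " " else a.getD k " ") ∧
      (js.foldl pairStep (a, b)).2.getD k " " =
        (if k ∈ js ∧ b.getD k " " = " " ∧ a.getD k " " ≠ " " then a.getD k " " else b.getD k " ") := by
  induction js generalizing a b with
  | nil => simp
  | cons n js ih =>
    have hn : n ∉ js := (List.nodup_cons.1 hnd).1
    have hnd' : js.Nodup := (List.nodup_cons.1 hnd).2
    have hb : n < a.length ∧ n < b.length := hlen n (by simp)
    rw [List.foldl_cons]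
    have hcnd : (pairStep (a, b) n).1.length = a.length ∧
        (pairStep (a, b) n).2.length = b.length := by
      rw [pairStep]; split <;> simp
    have hmain := ih (pairStep (a, b) n).1 (pairStep (a, b) n).2 hnd'
      (fun x hx => by rw [hcnd.1, hcnd.2]; exact hlen x (by simp [hx]))
    rcases hmain with ⟨h1, h2⟩
    rw [h1, h2]
    by_cases hk : k = n
    · subst hk
      have hLa : ¬(k ∈ js ∧ (pairStep (a, b) k).2.getD k " " = " " ∧
          (pairStep (a, b) k).1.getD k " " ≠ " ") := fun hx => hn hx.1
      by_cases hc : b.getD k " " = " " ∧ a.getD k " " ≠ " "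
      · have hps : pairStep (a, b) k = (a.set k " ", b.set k (a.getD k " ")) := by
          rw [pairStep, if_pos (by simpa using hc)]
        constructor
        · rw [if_neg hLa, if_pos (show _ ∧ _ from ⟨by simp, by exact hc⟩), hps]
          exact getD_set_self' _ _ hb.1 _
        · rw [if_neg hLa, if_pos (show _ ∧ _ from ⟨by simp, by exact hc⟩), hps]
          exact getD_set_self' _ _ hb.2 _
      · have hps : pairStep (a, b) k = (a, b) := by
          rw [pairStep, if_neg (by
            intro hcc
            simp only [Bool.and_eq_true, beq_iff_eq, bne_iff_ne] at hcc
            exact hc ⟨hcc.1, hcc.2⟩)]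
        constructor
        · rw [if_neg hLa, if_neg (fun hx => hc hx.2), hps]
        · rw [if_neg hLa, if_neg (fun hx => hc hx.2), hps]
    · have hga : (pairStep (a, b) n).1.getD k " " = a.getD k " " := by
        rw [pairStep]; split
        · exact getD_set_ne' _ _ _ (fun h => hk h.symm) _
        · rfl
      have hgb : (pairStep (a, b) n).2.getD k " " = b.getD k " " := by
        rw [pairStep]; split
        · exact getD_set_ne' _ _ _ (fun h => hk h.symm) _
        · rfl
      rw [hga, hgb]
      have hmem : (k ∈ js ∧ b.getD k " " = " " ∧ a.getD k " " ≠ " ") ↔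
          (k ∈ n :: js ∧ b.getD k " " = " " ∧ a.getD k " " ≠ " ") := by
        simp [List.mem_cons, hk]
      exact ⟨if_congr hmem rfl rfl, if_congr hmem rfl rfl⟩

-- shape invariants of the pass
def rect (g : List (List String)) (C : Nat) : Prop := ∀ row ∈ g, row.length = C

theorem foldl_preserve_mem {α β : Type} (P : α → Prop) (f : α → β → α) :
    ∀ (l : List β) (a : α), (∀ a b, b ∈ l → P a → P (f a b)) → P a → P (l.foldl f a)
  | [], a, _, ha => ha
  | b :: l, a, h, ha =>
    foldl_preserve_mem P f l (f a b) (fun a' b' hb' => h a' b' (List.mem_cons_of_mem _ hb'))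
      (h a b (by simp) ha)

theorem setCell_length (g : List (List String)) (m n : Nat) (v : String) :
    (setCell g m n v).length = g.length := by simp [setCell]

theorem moveC_length (m : Nat) (g : List (List String)) (n : Nat) :
    (moveC m g n).length = g.length := by
  rw [moveC]; split <;> simp [setCell]

theorem gRow_mem (g : List (List String)) (m : Nat) (hm : m < g.length) : gRow g m ∈ g := by
  rw [gRow, List.getD_eq_getElem?_getD, List.getElem?_eq_getElem hm, Option.getD_some]
  exact List.getElem_mem hm

theorem gRow_length (g : List (List String)) (C : Nat) (h : rect g C) (m : Nat)
    (hm : m < g.length) : (gRow g m).length = C := h _ (gRow_mem g m hm)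

theorem rect_setCell (g : List (List String)) (C : Nat) (m n : Nat) (v : String)
    (hm : m < g.length) (h : rect g C) : rect (setCell g m n v) C := by
  intro row hrow
  rcases List.mem_or_eq_of_mem_set hrow with hmem | rfl
  · exact h row hmem
  · rw [List.length_set]
    exact gRow_length g C h m hm

theorem moveC_rect (m : Nat) (g : List (List String)) (n : Nat) (C : Nat)
    (hm1 : 1 ≤ m) (hm : m < g.length) (h : rect g C) : rect (moveC m g n) C := by
  rw [moveC]; split
  · exact rect_setCell _ C _ _ _ (by simp [setCell_length]; omega)
      (rect_setCell _ C _ _ _ hm h)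
  · exact h

theorem passA_length (g : List (List String)) : (passA g).length = g.length := by
  rw [passA]
  refine foldl_preserve_mem (fun g' => g'.length = g.length) _ _ g ?_ rfl
  intro g' m _ hlen
  refine foldl_preserve_mem (fun h' => h'.length = g.length) _ _ g' ?_ hlen
  intro h' n _ hlen'
  rw [moveC_length, hlen']

theorem passA_rect (g : List (List String)) (C : Nat) (h : rect g C) : rect (passA g) C := by
  rw [passA]
  have := foldl_preserve_mem (fun g' => g'.length = g.length ∧ rect g' C)
    (fun g' m => (List.range' 1 ((gRow g' m).length - 2)).foldl (moveC m) g')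
    (List.range' 1 (g.length - 2)) g ?_ ⟨rfl, h⟩
  · exact this.2
  · intro g' m hm ⟨hlen, hrect'⟩
    have hmR : m < g'.length := by
      rw [hlen]
      have := List.mem_range'_1.1 hm
      omega
    have hm1 : 1 ≤ m := (List.mem_range'_1.1 hm).1
    refine foldl_preserve_mem (fun h' => h'.length = g.length ∧ rect h' C) _ _ g' ?_ ⟨hlen, hrect'⟩
    intro h' n _ ⟨hlen', hrect''⟩
    exact ⟨by rw [moveC_length, hlen'], moveC_rect m h' n C hm1 (by omega) hrect''⟩

theorem set_getD_self (l : List String) (i : Nat) : l.set i (l.getD i " ") = l := by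
  by_cases hi : i < l.length
  · apply List.ext_getElem
    · simp
    · intro n hn hn'
      rw [List.getElem_set]
      split
      · rename_i h; subst h
        simp [List.getD_eq_getElem?_getD, List.getElem?_eq_getElem hi]
      · rfl
  · rw [List.set_eq_of_length_le (by omega)]

-- a single row pass in column form
theorem rowTrans_col (g : List (List String)) (C : Nat) (hrect : rect g C) (hC : 3 ≤ C)
    (m : Nat) (hm1 : 1 ≤ m) (hm : m < g.length) (j : Nat) (hj : j < C) :
    colOf ((List.range' 1 ((gRow g m).length - 2)).foldl (moveC m) g) j =
      if 0 < j ∧ j < C - 1 then stepC m (colOf g j) else colOf g j := by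
  have hmlen : (gRow g m).length = C := gRow_length g C hrect m hm
  set js := List.range' 1 (C - 2) with hjs
  have hjs' : List.range' 1 ((gRow g m).length - 2) = js := by rw [hmlen]
  rw [hjs']
  have hb0 : (gRow g (m - 1)).length = C := gRow_length g C hrect (m - 1) (by omega)
  rw [inner_as_pair m hm1 js g hm]
  have hnd : js.Nodup := List.nodup_range'
  have hbnd : ∀ n ∈ js, n < (gRow g (m - 1)).length ∧ n < (gRow g m).length := by
    intro n hn
    have := List.mem_range'_1.1 hn
    omega
  obtain ⟨hA, hB⟩ := pairFold_getD js (gRow g (m - 1)) (gRow g m) hnd hbnd j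
  rw [show colOf ((g.set (m - 1) (js.foldl pairStep (gRow g (m - 1), gRow g m)).1).set m
      (js.foldl pairStep (gRow g (m - 1), gRow g m)).2) j =
      ((colOf g j).set (m - 1) ((js.foldl pairStep (gRow g (m - 1), gRow g m)).1.getD j " ")).set m
      ((js.foldl pairStep (gRow g (m - 1), gRow g m)).2.getD j " ") from by
    simp [colOf, List.map_set]]
  have hc1 : (gRow g (m - 1)).getD j " " = (colOf g j).getD (m - 1) " " :=
    (cell_colOf g (m - 1) j (by omega)).symm
  have hc2 : (gRow g m).getD j " " = (colOf g j).getD m " " :=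
    (cell_colOf g m j (by omega)).symm
  have hmem : j ∈ js ↔ (0 < j ∧ j < C - 1) := by
    rw [hjs, List.mem_range'_1]
    omega
  rw [hA, hB, hc1, hc2]
  by_cases hint : 0 < j ∧ j < C - 1
  · rw [if_pos hint, stepC]
    by_cases hcnd : (colOf g j).getD m " " = " " ∧ (colOf g j).getD (m - 1) " " ≠ " "
    · rw [if_pos ⟨hmem.2 hint, hcnd.1, hcnd.2⟩, if_pos ⟨hmem.2 hint, hcnd.1, hcnd.2⟩,
        if_pos hcnd]
    · rw [if_neg (fun hx => hcnd ⟨hx.2.1, hx.2.2⟩), if_neg (fun hx => hcnd ⟨hx.2.1, hx.2.2⟩),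
        if_neg hcnd, set_getD_self, set_getD_self]
  · rw [if_neg hint, if_neg (fun hx => hint (hmem.1 hx.1)),
      if_neg (fun hx => hint (hmem.1 hx.1)), set_getD_self, set_getD_self]

def wkCol (k : Nat) (col : List String) : List String :=
  match col with
  | [] => []
  | c0 :: rest => wk k c0 rest

theorem stepC_cons (i : Nat) (hi : 1 ≤ i) (c : String) (x : List String) :
    stepC (i + 1) (c :: x) = c :: stepC i x := by
  obtain ⟨i', rfl⟩ : ∃ i', i = i' + 1 := ⟨i - 1, by omega⟩
  rw [stepC, stepC]
  simp only [List.getD_cons_succ, Nat.add_sub_cancel]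
  split_ifs with h
  · rw [List.set_cons_succ, List.set_cons_succ]
  · rfl

theorem wk_succ (m : Nat) : ∀ (a : String) (l : List String), m + 1 ≤ l.length →
    wk (m + 1) a l = stepC (m + 1) (wk m a l) := by
  induction m with
  | zero =>
    intro a l hl
    match l with
    | b :: t =>
      by_cases hb : b = " " <;> by_cases ha : a = " " <;>
        simp [wk, stepC, hb, ha]
  | succ m ih =>
    intro a l hl
    match l with
    | b :: t =>
      have ht : m + 1 ≤ t.length := by simpa using hl
      rw [wk]
      split
      · rw [ih a t ht, wk]
        rename_i hsw
        rw [if_pos hsw, stepC_cons (m + 1) (by omega)]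
      · rw [ih b t ht, wk]
        rename_i hsw
        rw [if_neg hsw, stepC_cons (m + 1) (by omega)]

theorem wk_spB (k : Nat) : ∀ (a : String) (l : List String),
    wk k a l = spB a (l.take k) ++ l.drop k := by
  induction k with
  | zero => intro a l; simp [wk, spB]
  | succ k ih =>
    intro a l
    cases l with
    | nil => simp [wk, spB]
    | cons b t =>
      rw [wk]
      simp only [List.take_succ_cons, List.drop_succ_cons]
      rw [spB]
      split
      · rw [ih]
        simp
      · rw [ih]
        simp

theorem drop_sub_one : ∀ (l : List String), ∀ d, l ≠ [] → l.drop (l.length - 1) = [l.getLastD d]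
  | [x], d, _ => by simp
  | x :: y :: t, d, _ => by
    have := drop_sub_one (y :: t) x (by simp)
    simp only [List.length_cons, Nat.add_sub_cancel] at *
    rw [List.getLastD_cons]
    exact this

theorem wkCol_fall (col : List String) (h : 2 ≤ col.length) :
    wkCol (col.length - 2) col = fallB col := by
  match col with
  | c0 :: rest =>
    have hrest : rest ≠ [] := by
      intro hr; subst hr; simp at h
    rw [wkCol, wk_spB, fallB_eq]
    have h1 : rest.take ((c0 :: rest).length - 2) = rest.dropLast := by
      rw [show (c0 :: rest).length - 2 = rest.length - 1 by
        simp only [List.length_cons]; omega, ← List.dropLast_eq_take]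
    have h2 : rest.drop ((c0 :: rest).length - 2) = [(c0 :: rest).getLastD " "] := by
      rw [show (c0 :: rest).length - 2 = rest.length - 1 by simp]
      rw [List.getLastD_cons]
      exact drop_sub_one rest c0 hrest
    rw [h1, h2]
    rfl

theorem colOf_passA (g : List (List String)) (C : Nat) (hrect : rect g C) (hC : 3 ≤ C)
    (hR : 4 ≤ g.length) (j : Nat) (hj : j < C) :
    colOf (passA g) j = if 0 < j ∧ j < C - 1 then fallB (colOf g j) else colOf g j := by
  have hmain : ∀ k, k ≤ g.length - 2 →
      ((List.range' 1 k).foldl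
          (fun g' m => (List.range' 1 ((gRow g' m).length - 2)).foldl (moveC m) g') g).length
          = g.length ∧
        rect ((List.range' 1 k).foldl
          (fun g' m => (List.range' 1 ((gRow g' m).length - 2)).foldl (moveC m) g') g) C ∧
        ∀ j, j < C →
          colOf ((List.range' 1 k).foldl
            (fun g' m => (List.range' 1 ((gRow g' m).length - 2)).foldl (moveC m) g') g) j =
            if 0 < j ∧ j < C - 1 then wkCol k (colOf g j) else colOf g j := by
    intro k
    induction k with
    | zero =>
      intro _
      refine ⟨by simp, by simpa using hrect, ?_⟩
      intro j hj
      split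
      · match hcol : colOf g j with
        | [] => rfl
        | c0 :: rest => rw [wkCol, wk]
      · rfl
    | succ k ih =>
      intro hk
      obtain ⟨hlen, hrect', hcols⟩ := ih (by omega)
      have hrng : List.range' 1 (k + 1) = List.range' 1 k ++ [k + 1] := by
        have h11 : 1 + 1 * k = k + 1 := by omega
        rw [List.range'_concat, h11]
      rw [hrng, List.foldl_append, List.foldl_cons, List.foldl_nil]
      set E := (List.range' 1 k).foldl
        (fun g' m => (List.range' 1 ((gRow g' m).length - 2)).foldl (moveC m) g') g with hE
      have hshape : ((List.range' 1 ((gRow E (k + 1)).length - 2)).foldl (moveC (k + 1)) E).length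
          = g.length ∧
          rect ((List.range' 1 ((gRow E (k + 1)).length - 2)).foldl (moveC (k + 1)) E) C := by
        refine foldl_preserve_mem
          (fun h' => h'.length = g.length ∧ rect h' C) _ _ _ ?_ ⟨hlen, hrect'⟩
        intro h' n _ hph
        exact ⟨by rw [moveC_length, hph.1],
          moveC_rect (k + 1) h' n C (by omega) (by omega) hph.2⟩
      refine ⟨hshape.1, hshape.2, ?_⟩
      intro j hj
      rw [rowTrans_col E C hrect' hC (k + 1) (by omega) (by omega) j hj]
      rw [hcols j hj]
      split
      · rename_i hint
        match hcol : colOf g j with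
        | [] =>
          exfalso
          have hcl := colOf_length g j
          rw [hcol] at hcl
          simp at hcl
          omega
        | c0 :: rest =>
          have hrlen : rest.length = g.length - 1 := by
            have hcl := colOf_length g j
            rw [hcol] at hcl
            simp at hcl
            omega
          rw [wkCol, wkCol, wk_succ k c0 rest (by omega)]
      · rfl
  obtain ⟨_, _, hcols⟩ := hmain (g.length - 2) (le_refl _)
  rw [show passA g = (List.range' 1 (g.length - 2)).foldl
    (fun g' m => (List.range' 1 ((gRow g' m).length - 2)).foldl (moveC m) g') g from rfl]
  rw [hcols j hj]
  split
  · rw [show g.length - 2 = (colOf g j).length - 2 by rw [colOf_length]]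
    rw [wkCol_fall _ (by rw [colOf_length]; omega)]
  · rfl

def assemble (R C : Nat) (F : Nat → List String) : List (List String) :=
  (List.range R).map (fun m => (List.range C).map (fun j => (F j).getD m " "))

theorem board_eq_assemble (g : List (List String)) (C : Nat) (hrect : rect g C) :
    g = assemble g.length C (fun j => colOf g j) := by
  unfold assemble
  apply List.ext_getElem
  · simp
  · intro m hm hm'
    have hm2 : m < g.length := by simpa using hm
    rw [List.getElem_map, List.getElem_range]
    apply List.ext_getElem
    · simpa using hrect g[m] (List.getElem_mem hm2)
    · intro j hj hj'
      rw [List.getElem_map, List.getElem_range]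
      rw [cell_colOf g m j hm2]
      simp only [cell, gRow, List.getD_eq_getElem?_getD, List.getElem?_eq_getElem hm2,
        Option.getD_some]
      rw [List.getElem?_eq_getElem hj, Option.getD_some]

theorem bool_eq_of_iff {a b : Bool} (h : a = true ↔ b = true) : a = b := by
  cases a <;> cases b <;> simp_all

theorem checkA_eq (g : List (List String)) (is : List Nat) (d : Bool)
    (h : ∀ i ∈ is, 3 ≤ (gRow g i).length) :
    checkA g is d = if is.isEmpty then d
      else is.all (fun i => (List.range' 1 ((gRow g i).length - 2)).all
        (fun j => !(cell g i j != " " && cell g (i + 1) j == " "))) := by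
  induction is generalizing d with
  | nil => simp [checkA]
  | cons i is' ih =>
    rw [checkA]
    have hlen := h i (by simp)
    have hnil : List.range' 1 ((gRow g i).length - 2) ≠ [] := by
      rw [ne_eq, List.range'_eq_nil_iff]
      omega
    rw [checkRowA_eq,
      if_neg (show ¬((List.range' 1 ((gRow g i).length - 2)).isEmpty = true) by
        simpa using hnil)]
    have ht : ∀ i' ∈ is', 3 ≤ (gRow g i').length :=
      fun i' hi' => h i' (List.mem_cons_of_mem _ hi')
    by_cases hd : ((List.range' 1 ((gRow g i).length - 2)).all
        (fun j => !(cell g i j != " " && cell g (i + 1) j == " "))) = true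
    · rw [if_pos hd, ih _ ht]
      cases is' with
      | nil =>
        rw [if_pos (show (([] : List Nat).isEmpty = true) by simp),
          if_neg (show ¬(([i] : List Nat).isEmpty = true) by simp),
          List.all_cons, List.all_nil, Bool.and_true]
      | cons i2 t2 =>
        rw [if_neg (show ¬((i2 :: t2).isEmpty = true) by simp),
          if_neg (show ¬((i :: i2 :: t2).isEmpty = true) by simp)]
        conv_rhs => rw [List.all_cons]
        rw [hd, Bool.true_and]
    · rw [if_neg hd]
      have hdf : ((List.range' 1 ((gRow g i).length - 2)).all
          (fun j => !(cell g i j != " " && cell g (i + 1) j == " "))) = false := by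
        cases hx : ((List.range' 1 ((gRow g i).length - 2)).all
            (fun j => !(cell g i j != " " && cell g (i + 1) j == " ")))
        · rfl
        · exact absurd hx hd
      rw [if_neg (show ¬((i :: is').isEmpty = true) by simp),
        List.all_cons, hdf, Bool.false_and]

theorem adjAll_iff : ∀ (l : List String),
    (((l.zip (l.drop 1)).all (fun p => !(p.1 != " " && p.2 == " "))) = true ↔
      (∀ k, k + 1 < l.length → ¬(l.getD k " " ≠ " " ∧ l.getD (k + 1) " " = " ")))
  | [] => by simp
  | [x] => by simp
  | a :: b :: t => by
    have ih := adjAll_iff (b :: t)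
    simp only [List.drop_succ_cons, List.drop_zero, List.zip_cons_cons, List.all_cons,
      Bool.and_eq_true] at *
    constructor
    · intro hh k hk
      cases k with
      | zero =>
        simp only [List.getD_cons_zero, List.getD_cons_succ]
        intro hv2
        have := hh.1
        simp [hv2.1, hv2.2] at this
      | succ k =>
        simp only [List.getD_cons_succ]
        exact ih.1 hh.2 k (by simpa using hk)
    · intro hh
      refine ⟨?_, ih.2 (fun k hk => by
        have := hh (k + 1) (by simpa using hk)
        simpa using this)⟩
      have h0 := hh 0 (by simp)
      simp only [List.getD_cons_zero, List.getD_cons_succ] at h0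
      by_cases ha : a = " " <;> by_cases hb : b = " " <;> simp [ha, hb] <;> tauto

theorem stableB_iff (col : List String) :
    stableB col = true ↔
      (∀ i, 1 ≤ i → i + 2 < col.length →
        ¬(col.getD i " " ≠ " " ∧ col.getD (i + 1) " " = " ")) := by
  rw [show stableB col = (((col.drop 1).dropLast).zip (((col.drop 1).dropLast).drop 1)).all
    (fun p => !(p.1 != " " && p.2 == " ")) from rfl]
  rw [adjAll_iff]
  have hlen : ((col.drop 1).dropLast).length = col.length - 2 := by
    simp only [List.length_dropLast, List.length_drop]
    omega
  have hget : ∀ k, k < col.length - 2 →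
      ((col.drop 1).dropLast).getD k " " = col.getD (k + 1) " " := by
    intro k hk
    rw [List.getD_eq_getElem?_getD, List.getElem?_eq_getElem (by omega),
      List.getD_eq_getElem?_getD, List.getElem?_eq_getElem (by omega)]
    simp only [Option.getD_some, List.getElem_dropLast, List.getElem_drop]
    congr 1
    omega
  constructor
  · intro h i h1 h2
    obtain ⟨i', rfl⟩ : ∃ i', i = i' + 1 := ⟨i - 1, by omega⟩
    have := h i' (by omega)
    rw [hget i' (by omega), hget (i' + 1) (by omega)] at this
    exact this
  · intro h k hk
    have := h (k + 1) (by omega) (by omega)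
    rw [hget k (by omega), hget (k + 1) (by omega)]
    exact this

theorem doneA_eq (g : List (List String)) (C : Nat) (hrect : rect g C) (hC : 3 ≤ C)
    (hR : 4 ≤ g.length) :
    doneA g = (List.range' 1 (C - 2)).all (fun j => stableB (colOf g j)) := by
  have hrows : ∀ i ∈ List.range' 1 (g.length - 3), 3 ≤ (gRow g i).length := by
    intro i hi
    have hib := List.mem_range'_1.1 hi
    rw [gRow_length g C hrect i (by omega)]
    omega
  have hnil : List.range' 1 (g.length - 3) ≠ [] := by
    rw [ne_eq, List.range'_eq_nil_iff]
    omega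
  rw [doneA, checkA_eq g _ true hrows,
    if_neg (show ¬((List.range' 1 (g.length - 3)).isEmpty = true) by simpa using hnil)]
  apply bool_eq_of_iff
  simp only [List.all_eq_true, List.mem_range'_1]
  constructor
  · intro h j hj
    rw [stableB_iff]
    intro i h1 h2
    have hcl : (colOf g j).length = g.length := colOf_length g j
    rw [hcl] at h2
    have hrow := h i ⟨h1, by omega⟩
    have hjlen : (gRow g i).length = C := gRow_length g C hrect i (by omega)
    rw [hjlen] at hrow
    have hbool := hrow j ⟨hj.1, by omega⟩
    rw [cell_colOf g i j (by omega), cell_colOf g (i + 1) j (by omega)]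
    intro hv2
    simp [hv2.1, hv2.2] at hbool
  · intro h i hi j hj
    have hjlen : (gRow g i).length = C := gRow_length g C hrect i (by omega)
    rw [hjlen] at hj
    have hst := (stableB_iff (colOf g j)).1 (h j ⟨hj.1, by omega⟩) i hi.1
      (by rw [colOf_length]; omega)
    rw [cell_colOf g i j (by omega), cell_colOf g (i + 1) j (by omega)] at hst
    by_cases h1 : cell g i j = " " <;> by_cases h2 : cell g (i + 1) j = " " <;>
      simp [h1, h2] <;> exact hst ⟨h1, h2⟩

theorem dropLast_getLastD (l : List String) (d : String) (h : l ≠ []) :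
    l.dropLast ++ [l.getLastD d] = l := by
  induction l generalizing d with
  | nil => exact absurd rfl h
  | cons x t ih =>
    cases t with
    | nil => simp
    | cons y t' =>
      rw [List.getLastD_cons, show (x :: y :: t').dropLast = x :: (y :: t').dropLast from rfl,
        List.cons_append, ih x (by simp)]

theorem fallB_perm (col : List String) (h : 2 ≤ col.length) : (fallB col).Perm col := by
  match col with
  | c0 :: rest =>
    have hrest : rest ≠ [] := by
      intro hr; subst hr; simp at h
    rw [fallB_eq]
    have hsplit : (c0 :: rest).getLastD " " = rest.getLastD c0 := List.getLastD_cons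
    rw [hsplit]
    refine ((spB_perm c0 (midc (c0 :: rest))).append_right [rest.getLastD c0]).trans ?_
    rw [show midc (c0 :: rest) = rest.dropLast from rfl, List.cons_append,
      dropLast_getLastD rest c0 hrest]

theorem allBlank_iff_cols (g : List (List String)) (C : Nat) (hrect : rect g C) :
    allBlank g = true ↔ ∀ j, j < C → ∀ x ∈ colOf g j, x = " " := by
  rw [allBlank, List.all_eq_true]
  constructor
  · intro h j hj x hx
    rw [colOf] at hx
    obtain ⟨row, hrow, rfl⟩ := List.mem_map.1 hx
    have hall := h row hrow
    rw [List.all_eq_true] at hall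
    have hjr : j < row.length := by rw [hrect row hrow]; omega
    rw [List.getD_eq_getElem?_getD, List.getElem?_eq_getElem hjr, Option.getD_some]
    simpa using hall _ (List.getElem_mem hjr)
  · intro h row hrow
    rw [List.all_eq_true]
    intro x hx
    obtain ⟨j, hj, rfl⟩ := List.mem_iff_getElem.1 hx
    have hjC : j < C := by rw [← hrect row hrow]; omega
    have hmem : row[j] ∈ colOf g j := by
      rw [colOf]
      refine List.mem_map.2 ⟨row, hrow, ?_⟩
      rw [List.getD_eq_getElem?_getD, List.getElem?_eq_getElem hj, Option.getD_some]
    simpa using h j hjC _ hmem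

theorem allBlank_passA (g : List (List String)) (C : Nat) (hrect : rect g C) (hC : 3 ≤ C)
    (hR : 4 ≤ g.length) : allBlank (passA g) = allBlank g := by
  apply bool_eq_of_iff
  rw [allBlank_iff_cols (passA g) C (passA_rect g C hrect), allBlank_iff_cols g C hrect]
  have hpm : ∀ j, j < C →
      ((∀ x ∈ colOf (passA g) j, x = " ") ↔ (∀ x ∈ colOf g j, x = " ")) := by
    intro j hj
    rw [colOf_passA g C hrect hC hR j hj]
    split
    · have hperm := fallB_perm (colOf g j) (by rw [colOf_length]; omega)
      constructor <;> intro h x hx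
      · exact h x (hperm.mem_iff.2 hx)
      · exact h x (hperm.mem_iff.1 hx)
    · exact Iff.rfl
  exact forall_congr' fun j => imp_congr_right fun hj => hpm j hj

theorem init_le_foldl_max : ∀ (l : List Nat) (a : Nat), a ≤ l.foldl max a
  | [], a => le_refl a
  | b :: l, a => le_trans (le_max_left a b) (init_le_foldl_max l (max a b))

theorem le_foldl_max_nat : ∀ (l : List Nat) (a x : Nat), x ∈ l → x ≤ l.foldl max a
  | b :: l, a, x, hx => by
    rcases List.mem_cons.1 hx with rfl | hx
    · exact le_trans (le_max_right a x) (init_le_foldl_max l (max a x))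
    · exact le_foldl_max_nat l (max a b) x hx

theorem foldl_max_le : ∀ (l : List Nat) (a b : Nat), a ≤ b → (∀ x ∈ l, x ≤ b) →
    l.foldl max a ≤ b
  | [], a, b, ha, _ => ha
  | c :: l, a, b, ha, h => foldl_max_le l (max a c) b (max_le ha (h c (by simp)))
      (fun x hx => h x (List.mem_cons_of_mem _ hx))

theorem foldl_max_map_sub : ∀ (l : List Nat) (a : Nat),
    (l.map (fun x => x - 1)).foldl max (a - 1) = l.foldl max a - 1
  | [], a => rfl
  | b :: l, a => by
    rw [List.map_cons, List.foldl_cons, List.foldl_cons,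
      show max (a - 1) (b - 1) = max a b - 1 by omega]
    exact foldl_max_map_sub l (max a b)

theorem assemble_congr (R C : Nat) (F G : Nat → List String) (h : ∀ j, j < C → F j = G j) :
    assemble R C F = assemble R C G := by
  unfold assemble
  apply List.map_congr_left
  intro m _
  apply List.map_congr_left
  intro j hj
  rw [h j (List.mem_range.1 hj)]

def Pmax (g : List (List String)) (C : Nat) : Nat :=
  ((List.range' 1 (C - 2)).map (fun j => tau (colOf g j))).foldl max 0

theorem loop_main (C : Nat) (hC : 3 ≤ C) : ∀ fuel g, 4 ≤ g.length → rect g C →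
    allBlank g = false → PhiG g C < fuel →
    loopA fuel g =
      (assemble g.length C
        (fun j => if 0 < j ∧ j < C - 1 then fallB^[Pmax g C] (colOf g j) else colOf g j),
        false) := by
  intro fuel
  induction fuel with
  | zero => intro g _ _ _ hPhi; omega
  | succ fuel ih =>
    intro g hR hrect hnb hPhi
    rw [loopA]
    have hscan : scanA g true = false := by
      rw [scanA_true]
      exact hnb
    rw [hscan, if_neg (by simp)]
    have h3 : (g.length == 3) = false := by
      simp only [beq_eq_false_iff_ne, ne_eq]
      omega
    rw [h3, if_neg (by simp)]
    rw [doneA_eq g C hrect hC hR]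
    by_cases hdone : ((List.range' 1 (C - 2)).all (fun j => stableB (colOf g j))) = true
    · rw [if_pos hdone]
      have htau : ∀ j, 0 < j → j < C - 1 → tau (colOf g j) = 0 := by
        intro j h1 h2
        rw [List.all_eq_true] at hdone
        exact (tau_zero_iff _).2 (hdone j (List.mem_range'_1.2 ⟨h1, by omega⟩))
      have hP0 : Pmax g C = 0 := by
        rw [Pmax]
        refine Nat.le_antisymm ?_ (Nat.zero_le _)
        refine foldl_max_le _ 0 0 (le_refl 0) ?_
        intro x hx
        obtain ⟨j, hjm, rfl⟩ := List.mem_map.1 hx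
        have hjb := List.mem_range'_1.1 hjm
        rw [htau j hjb.1 (by omega)]
      have hb : assemble g.length C
          (fun j => if 0 < j ∧ j < C - 1 then fallB^[Pmax g C] (colOf g j) else colOf g j)
          = g := by
        rw [hP0]
        rw [assemble_congr g.length C _ (fun j => colOf g j)
          (fun j hj => by split <;> simp)]
        exact (board_eq_assemble g C hrect).symm
      rw [hb]
    · rw [if_neg hdone]
      have hex : ∃ j0 ∈ List.range' 1 (C - 2), stableB (colOf g j0) = false := by
        by_contra hall
        apply hdone
        rw [List.all_eq_true]
        intro j hjm
        cases hbc : stableB (colOf g j)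
        · exact absurd ⟨j, hjm, hbc⟩ hall
        · rfl
      obtain ⟨j0, hj0m, hj0⟩ := hex
      have hj0b := List.mem_range'_1.1 hj0m
      have hPhiLt : PhiG (passA g) C < PhiG g C := by
        rw [PhiG, PhiG]
        have hcong : (List.range' 1 (C - 2)).map (fun j => phiA (colOf (passA g) j)) =
            (List.range' 1 (C - 2)).map (fun j => phiA (fallB (colOf g j))) := by
          apply List.map_congr_left
          intro j hjm
          have hb := List.mem_range'_1.1 hjm
          rw [colOf_passA g C hrect hC hR j (by omega), if_pos ⟨by omega, by omega⟩]
        rw [hcong]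
        exact List.sum_lt_sum _ _ (fun i _ => phiA_fallB_le _)
          ⟨j0, hj0m, stableB_false_phiA _ hj0⟩
      have hnb' : allBlank (passA g) = false := by
        rw [allBlank_passA g C hrect hC hR]
        exact hnb
      rw [ih (passA g) (by rw [passA_length]; omega) (passA_rect g C hrect) hnb' (by omega)]
      have hPpos : 1 ≤ Pmax g C := by
        have htau1 : 1 ≤ tau (colOf g j0) := by
          rcases Nat.eq_zero_or_pos (tau (colOf g j0)) with h0 | h1
          · have := (tau_zero_iff _).1 h0
            rw [this] at hj0
            cases hj0
          · exact h1
        exact le_trans htau1 (le_foldl_max_nat _ 0 _ (List.mem_map.2 ⟨j0, hj0m, rfl⟩))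
      have hPm : Pmax (passA g) C = Pmax g C - 1 := by
        rw [Pmax, Pmax]
        have hcong : (List.range' 1 (C - 2)).map (fun j => tau (colOf (passA g) j)) =
            ((List.range' 1 (C - 2)).map (fun j => tau (colOf g j))).map (fun x => x - 1) := by
          rw [List.map_map]
          apply List.map_congr_left
          intro j hjm
          have hb := List.mem_range'_1.1 hjm
          simp only [Function.comp]
          rw [colOf_passA g C hrect hC hR j (by omega), if_pos ⟨by omega, by omega⟩, tau_fallB]
        rw [hcong]
        have hfm := foldl_max_map_sub ((List.range' 1 (C - 2)).map (fun j => tau (colOf g j))) 0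
        simpa using hfm
      rw [passA_length]
      refine congrArg (fun b => (b, false)) ?_
      apply assemble_congr
      intro j hj
      rw [colOf_passA g C hrect hC hR j hj]
      by_cases hint : 0 < j ∧ j < C - 1
      · rw [if_pos hint, if_pos hint, if_pos hint, hPm, ← Function.iterate_succ_apply]
        have hiter : (Pmax g C - 1).succ = Pmax g C := by omega
        rw [hiter]
      · rw [if_neg hint, if_neg hint, if_neg hint]

-- B's while loop runs the synchronous per-column process to its global stopping time (= max tau)
theorem loopB_eq (fuel : Nat) : ∀ (mid : List (List String)), (∀ c ∈ mid, tau c ≤ fuel) →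
    loopB fuel mid = mid.map (fun c => fallB^[(mid.map tau).foldl max 0] c) := by
  induction fuel with
  | zero =>
    intro mid h
    have hz : ∀ x ∈ mid.map tau, x ≤ 0 := by
      intro x hx
      obtain ⟨c, hc, rfl⟩ := List.mem_map.1 hx
      exact h c hc
    have hT : (mid.map tau).foldl max 0 = 0 :=
      Nat.le_antisymm (foldl_max_le _ 0 0 (le_refl 0) hz) (Nat.zero_le _)
    rw [loopB, hT]
    simp
  | succ fuel ih =>
    intro mid h
    rw [loopB]
    by_cases hall : mid.all stableB = true
    · rw [if_pos hall]
      rw [List.all_eq_true] at hall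
      have hz : ∀ x ∈ mid.map tau, x ≤ 0 := by
        intro x hx
        obtain ⟨c, hc, rfl⟩ := List.mem_map.1 hx
        rw [(tau_zero_iff c).2 (hall c hc)]
      have hT : (mid.map tau).foldl max 0 = 0 :=
        Nat.le_antisymm (foldl_max_le _ 0 0 (le_refl 0) hz) (Nat.zero_le _)
      rw [hT]
      simp
    · rw [if_neg hall]
      have h' : ∀ c ∈ mid.map fallB, tau c ≤ fuel := by
        intro c hc
        obtain ⟨c0, hc0, rfl⟩ := List.mem_map.1 hc
        rw [tau_fallB]
        have := h c0 hc0
        omega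
      rw [ih (mid.map fallB) h']
      have hmaps : (mid.map fallB).map tau = (mid.map tau).map (fun x => x - 1) := by
        rw [List.map_map, List.map_map]
        apply List.map_congr_left
        intro c _
        simp only [Function.comp]
        rw [tau_fallB]
      have hT' : ((mid.map fallB).map tau).foldl max 0 = (mid.map tau).foldl max 0 - 1 := by
        rw [hmaps]
        have := foldl_max_map_sub (mid.map tau) 0
        simpa using this
      have hTpos : 1 ≤ (mid.map tau).foldl max 0 := by
        have hex : ∃ c ∈ mid, stableB c = false := by
          by_contra hno
          apply hall
          rw [List.all_eq_true]
          intro c hc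
          cases hbc : stableB c
          · exact absurd ⟨c, hc, hbc⟩ hno
          · rfl
        obtain ⟨c, hc, hcf⟩ := hex
        have h1 : 1 ≤ tau c := by
          rcases Nat.eq_zero_or_pos (tau c) with h0 | h1
          · rw [(tau_zero_iff c).1 h0] at hcf
            cases hcf
          · exact h1
        exact le_trans h1 (le_foldl_max_nat _ 0 _ (List.mem_map.2 ⟨c, hc, rfl⟩))
      rw [hT', List.map_map]
      apply List.map_congr_left
      intro c _
      simp only [Function.comp]
      obtain ⟨s, hs⟩ : ∃ s, (mid.map tau).foldl max 0 = s + 1 :=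
        ⟨(mid.map tau).foldl max 0 - 1, by omega⟩
      rw [hs, Nat.add_sub_cancel, Function.iterate_succ_apply]

-- fuel for A's recursion suffices
theorem PhiG_bound (g : List (List String)) (C : Nat) (hrect : rect g C) :
    PhiG g C < g.length * g.length * C + 2 := by
  have hone : ∀ j, phiA (colOf g j) ≤ g.length * g.length := by
    intro j
    have hsq := phi_le_sq ((colOf g j).dropLast)
    have hl : ((colOf g j).dropLast).length ≤ g.length := by
      rw [List.length_dropLast, colOf_length]
      omega
    calc phiA (colOf g j) = phi ((colOf g j).dropLast) := rfl
      _ ≤ ((colOf g j).dropLast).length * ((colOf g j).dropLast).length := hsq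
      _ ≤ g.length * g.length := Nat.mul_le_mul hl hl
  have hsum : PhiG g C ≤ (C - 2) * (g.length * g.length) := by
    rw [PhiG]
    have := List.sum_le_card_nsmul
      ((List.range' 1 (C - 2)).map (fun j => phiA (colOf g j))) (g.length * g.length)
      (by
        intro x hx
        obtain ⟨j, _, rfl⟩ := List.mem_map.1 hx
        exact hone j)
    simpa [smul_eq_mul] using this
  have hle : (C - 2) * (g.length * g.length) ≤ g.length * g.length * C := by
    calc (C - 2) * (g.length * g.length) ≤ C * (g.length * g.length) :=
          Nat.mul_le_mul_right _ (by omega)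
      _ = g.length * g.length * C := Nat.mul_comm _ _
  omega

theorem tau_bound (g : List (List String)) (j : Nat) :
    tau (colOf g j) ≤ g.length * g.length := by
  refine le_trans (tau_le_phiA _) ?_
  have hsq := phi_le_sq ((colOf g j).dropLast)
  have hl : ((colOf g j).dropLast).length ≤ g.length := by
    rw [List.length_dropLast, colOf_length]
    omega
  calc phiA (colOf g j) = phi ((colOf g j).dropLast) := rfl
    _ ≤ ((colOf g j).dropLast).length * ((colOf g j).dropLast).length := hsq
    _ ≤ g.length * g.length := Nat.mul_le_mul hl hl

theorem range_decomp (C : Nat) (hC : 3 ≤ C) :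
    List.range C = [0] ++ List.range' 1 (C - 2) ++ [C - 1] := by
  obtain ⟨K, rfl⟩ : ∃ K, C = K + 2 := ⟨C - 2, by omega⟩
  rw [List.range_eq_range', show K + 2 = (K + 1) + 1 by omega, List.range'_succ,
    List.range'_concat, show 1 + 1 * K = K + 1 by omega]
  simp

-- B's port evaluates to the per-column normal form
theorem alt_eval (g : List (List String)) (C : Nat) (hC : 3 ≤ C)
    (hCdef : C = (g.headD []).length) (hrect : rect g C) (hR : 4 ≤ g.length)
    (hab : allBlank g = false) :
    refresh_schema_alt g =
      (assemble g.length C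
        (fun j => if 0 < j ∧ j < C - 1 then fallB^[Pmax g C] (colOf g j) else colOf g j),
        false) := by
  rw [refresh_schema_alt]
  rw [if_neg (show ¬((g.all fun row => row.all fun c => c == " ") = true) by
    rw [show (g.all fun row => row.all fun c => c == " ") = allBlank g from rfl, hab]
    simp)]
  rw [if_neg (show ¬((g.length == 3) = true) by simp; omega)]
  simp only [← hCdef]
  -- the column list and its interior part
  have hcols : (List.range C).map (colOf g) =
      [colOf g 0] ++ (List.range' 1 (C - 2)).map (colOf g) ++ [colOf g (C - 1)] := by
    rw [range_decomp C hC]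
    simp
  have hmid : (((List.range C).map (colOf g)).drop 1).dropLast =
      (List.range' 1 (C - 2)).map (colOf g) := by
    rw [hcols]
    simp only [List.cons_append, List.nil_append, List.drop_succ_cons, List.drop_zero]
    rw [List.dropLast_concat]
  have hhead : ((List.range C).map (colOf g)).headD [] = colOf g 0 := by
    rw [hcols]; rfl
  have hlast : ((List.range C).map (colOf g)).getLastD [] = colOf g (C - 1) := by
    rw [hcols]
    exact List.getLastD_concat
  have hfuel : ∀ c ∈ (List.range' 1 (C - 2)).map (colOf g),
      tau c ≤ g.length * g.length + 1 := by
    intro c hc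
    obtain ⟨j, _, rfl⟩ := List.mem_map.1 hc
    have := tau_bound g j
    omega
  have hloop : loopB (g.length * g.length + 1) ((List.range' 1 (C - 2)).map (colOf g)) =
      ((List.range' 1 (C - 2)).map (colOf g)).map (fun c => fallB^[Pmax g C] c) := by
    rw [loopB_eq _ _ hfuel]
    have hTeq : (((List.range' 1 (C - 2)).map (colOf g)).map tau).foldl max 0 = Pmax g C := by
      rw [Pmax, List.map_map]
      rfl
    rw [hTeq]
  rw [hmid, hhead, hlast, hloop]
  refine congrArg (fun b => (b, false)) ?_
  have hcols' : colOf g 0 ::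
      ((List.range' 1 (C - 2)).map (colOf g)).map (fun c => fallB^[Pmax g C] c) ++
        [colOf g (C - 1)] =
      (List.range C).map
        (fun j => if 0 < j ∧ j < C - 1 then fallB^[Pmax g C] (colOf g j) else colOf g j) := by
    rw [range_decomp C hC]
    simp only [List.map_append, List.map_map, List.map_cons, List.map_nil]
    rw [if_neg (by omega), if_neg (by omega)]
    congr 1
    · congr 1
      apply List.map_congr_left
      intro j hj
      have hjb := List.mem_range'_1.1 hj
      simp only [Function.comp]
      rw [if_pos ⟨by omega, by omega⟩]
  rw [hcols']
  unfold assemble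
  apply List.map_congr_left
  intro m _
  rw [List.map_map]
  rfl

-- ===== VERDICT (by name: the statement is the Claim_ definition above) =====
theorem refresh_schema_spec : Claim_equal_refresh_schema := by
  unfold Claim_equal_refresh_schema
  intro g _ hpre
  unfold Spec_refresh_schema
  obtain ⟨hne, hhead, hcase⟩ := hpre
  obtain ⟨f0, hf0⟩ : ∃ f0, g.length * g.length * (gRow g 0).length + 2 = f0 + 1 :=
    ⟨g.length * g.length * (gRow g 0).length + 1, by omega⟩
  by_cases hab : allBlank g = true
  · -- both sides return (game_schema, True)
    have hscan : scanA g true = true := by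
      rw [scanA_true]
      exact hab
    rw [refresh_schema, hf0, loopA, hscan, if_pos rfl]
    rw [refresh_schema_alt,
      if_pos (show (g.all fun row => row.all fun c => c == " ") = true from hab)]
  · have hab' : allBlank g = false := by simpa using hab
    rcases hcase with hblank | h3 | hmain
    · exact absurd (by
        rw [allBlank, List.all_eq_true]
        intro row hrow
        rw [List.all_eq_true]
        intro c hc
        simpa using hblank row hrow c hc) hab
    · -- three-row board: both return (game_schema, False)
      have hscan : scanA g true = false := by
        rw [scanA_true]
        exact hab'
      rw [refresh_schema, hf0, loopA, hscan, if_neg (show ¬(false = true) by simp),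
        if_pos (show (g.length == 3) = true by simp [h3])]
      rw [refresh_schema_alt,
        if_neg (show ¬((g.all fun row => row.all fun c => c == " ") = true) from hab),
        if_pos (show (g.length == 3) = true by simp [h3])]
    · obtain ⟨hR, hrect0, hC0⟩ := hmain
      have hgr0 : gRow g 0 = g.headD [] := by cases g <;> rfl
      have hrect : rect g ((g.headD []).length) := hrect0
      have hC : 3 ≤ (g.headD []).length := hC0
      rw [refresh_schema, show (gRow g 0).length = (g.headD []).length by rw [hgr0]]
      rw [loop_main ((g.headD []).length) hC _ g hR hrect hab'
        (PhiG_bound g ((g.headD []).length) hrect)]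
      rw [alt_eval g ((g.headD []).length) hC rfl hrect hR hab']
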